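-- pv_equiv track=rewrite | github.com/omgimanerd/ritcs | cs264/src/hw3/problem3/pt1.py | findNextItem
-- ===== SOURCE A (Python) =====
-- def findNextItem(sequence, start):
--   if start == len(sequence) - 1:
--     return sequence[-1:]
--   minVal = sequence[start]
--   minIndex = start
--   for i in range(start, len(sequence)):
--     if sequence[i] < minVal:
--       minVal = sequence[i]
--       minIndex = i
--   return [minVal] + (findNextItem(sequence, minIndex + 1))
-- ===== SOURCE B (Python) =====
-- def findNextItem(sequence, start):
--   if start == len(sequence) - 1:
--     return sequence[-1:]
--   n = len(sequence)
--   # arg[j] = index of the leftmost minimum of sequence[j:], built right-to-left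
--   arg = [n - 1] * n
--   for j in range(n - 2, -1, -1):
--     arg[j] = j if sequence[j] <= sequence[arg[j + 1]] else arg[j + 1]
--   out = []
--   i = start
--   while True:
--     m = arg[i]
--     out.append(sequence[m])
--     if m == n - 1:
--       break
--     i = m + 1
--   return out
-- ===== Notes on version B (the rewrite author's own statement) =====
-- stated objective: faster
-- what changed: A rescans the whole remaining suffix for its minimum at every chain step and recurses (quadratic); B precomputes a suffix-argmin table in one backward pass and then jump-iterates through it (intended as faster; a timing run measured B 85x or more faster at large sizes, with A timing out on some largest-size inputs).
-- outside the precondition, e.g. on findNextItem([1, 2], -2): A returns [1, 1, 2], B returns [1, 2]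
import Mathlib
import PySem

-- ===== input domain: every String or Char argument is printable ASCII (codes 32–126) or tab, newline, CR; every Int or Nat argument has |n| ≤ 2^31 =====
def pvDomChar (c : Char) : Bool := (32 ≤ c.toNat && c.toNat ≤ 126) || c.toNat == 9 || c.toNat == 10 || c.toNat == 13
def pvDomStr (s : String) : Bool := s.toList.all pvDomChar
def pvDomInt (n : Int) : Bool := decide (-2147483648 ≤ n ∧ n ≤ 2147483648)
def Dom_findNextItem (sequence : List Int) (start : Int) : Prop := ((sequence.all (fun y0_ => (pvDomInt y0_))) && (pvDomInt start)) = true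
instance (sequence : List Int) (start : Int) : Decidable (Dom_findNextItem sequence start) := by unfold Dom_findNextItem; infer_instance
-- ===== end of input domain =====

-- B replaces A's quadratic scan-and-recurse (rescanning the suffix for its minimum at every chain
-- step) by one backward pass that precomputes a suffix-argmin table, then jump-iterates through it;
-- intended as faster (one pass instead of a scan per step); a timing run measured B 85x or
-- more faster at large sizes, with A timing out on some largest-size inputs where B returns.

-- ===== PORT A =====
-- A's recursion restarts at minIndex+1 which strictly increases and stays in [start, len),
-- so 2*length+2 steps of fuel always suffice where Python's recursion terminates (start may
-- be negative); fuel 0 is never reached on any input where the Python returns.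
def findNextItemFuelA : Nat → List Int → Int → List Int
  | 0, _, _ => []
  | fuel+1, sequence, start =>
    if start = (sequence.length : Int) - 1 then
      PySem.List.slice sequence (some (-1)) none          -- sequence[-1:]
    else
      match PySem.List.pyGet? sequence start with         -- minVal = sequence[start]  (none = IndexError)
      | none => []
      | some v =>
        -- for i in range(start, len(sequence)): if sequence[i] < minVal: …
        let st := (PySem.List.pyRange start (sequence.length : Int) 1).foldl
            (fun (p : Int × Int) i =>
              match PySem.List.pyGet? sequence i with
              | none => p
              | some x => if x < p.1 then (x, i) else p)
            (v, start)
        st.1 :: findNextItemFuelA fuel sequence (st.2 + 1)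

def findNextItem (sequence : List Int) (start : Int) : List Int :=
  findNextItemFuelA (2 * sequence.length + 2) sequence start

-- ===== PORT B =====
-- arg = [n-1]*n; for j in range(n-2,-1,-1): arg[j] = j if sequence[j] <= sequence[arg[j+1]] else arg[j+1]
def findNextItemTab (sequence : List Int) : List Int :=
  (PySem.List.pyRange ((sequence.length : Int) - 2) (-1) (-1)).foldl
    (fun (a : List Int) j =>
      match PySem.List.pyGet? sequence j, PySem.List.pyGet? a (j+1) with
      | some x, some t =>
        (match PySem.List.pyGet? sequence t with
         | some y => PySem.List.pySetD a j (if x ≤ y then j else t)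
         | none => a)
      | _, _ => a)
    (List.replicate sequence.length ((sequence.length : Int) - 1))

-- while True: m = arg[i]; out.append(sequence[m]); if m == n-1: break; i = m+1
-- i strictly increases after the first step, so length+1 steps of fuel always
-- suffice where Python's loop terminates; pyGet? none = the loop's IndexError.
def findNextItemLoopB : Nat → List Int → List Int → Int → List Int → List Int
  | 0, _, _, _, out => out
  | fuel+1, sequence, arg, i, out =>
    match PySem.List.pyGet? arg i with
    | none => out
    | some m =>
      match PySem.List.pyGet? sequence m with
      | none => out
      | some x =>
        if m = (sequence.length : Int) - 1 then out ++ [x]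
        else findNextItemLoopB fuel sequence arg (m+1) (out ++ [x])

def findNextItem_alt (sequence : List Int) (start : Int) : List Int :=
  if start = (sequence.length : Int) - 1 then
    PySem.List.slice sequence (some (-1)) none          -- sequence[-1:]
  else
    findNextItemLoopB (sequence.length + 1) sequence (findNextItemTab sequence) start []

-- ===== PRECONDITION & SPEC =====
-- Pre_ restricts to the natural domain 0 ≤ start < len (A accepts negative starts via Python's
-- index wraparound, scanning some trailing elements twice; that lies outside the task's natural
-- domain and is excluded as such) and excludes the inputs on which A's recursion overruns the
-- list and raises IndexError: whenever start < len-1 and the last element is strictly below the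
-- one before it, A's chain eventually picks minIndex = len-1 and recurses to sequence[len].
def Pre_findNextItem (sequence : List Int) (start : Int) : Prop :=
  0 ≤ start ∧ start < (sequence.length : Int) ∧
    (start = (sequence.length : Int) - 1 ∨
      sequence.getD (sequence.length - 2) 0 ≤ sequence.getD (sequence.length - 1) 0)
instance (sequence : List Int) (start : Int) : Decidable (Pre_findNextItem sequence start) := by
  unfold Pre_findNextItem; infer_instance

def pvWitness_findNextItem : List Int × Int := ([3, 1, 4, 1, 5, 9, 2, 6], 0)


def Spec_findNextItem (sequence : List Int) (start : Int) (out : List Int) : Prop :=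
  out = findNextItem_alt sequence start
instance (sequence : List Int) (start : Int) (out : List Int) : Decidable (Spec_findNextItem sequence start out) := by
  unfold Spec_findNextItem; infer_instance

-- ===== CLAIM (what is proved, stated in full; the proofs are below) =====
def Claim_equal_findNextItem : Prop := ∀ (sequence : List Int) (start : Int), Dom_findNextItem sequence start → Pre_findNextItem sequence start → Spec_findNextItem sequence start (findNextItem sequence start)


-- ===== LEMMAS AND PROOFS =====

-- `g xs i`: the i-th element, indices always in range where used
def pvG (xs : List Int) (i : Nat) : Int := xs.getD i 0

-- index i < len-1 survives into the chain iff its element is ≤ every later element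
def pvCrit (xs : List Int) (i : Nat) : Bool :=
  (List.range' (i+1) (xs.length - 1 - i)).all (fun j => decide (pvG xs i ≤ pvG xs j))

-- the common reference value: the chain of suffix minima from position s
def pvSpec (xs : List Int) (s : Nat) : List Int :=
  ((List.range' s (xs.length - 1 - s)).filter (pvCrit xs)).map (pvG xs) ++ [pvG xs (xs.length - 1)]

-- nat-level version of A's inner scan: process indices j, j+1, …, j+k-1
def pvScanA (xs : List Int) : Int → Nat → Nat → Nat → Int × Nat
  | v, m, _, 0 => (v, m)
  | v, m, j, k+1 =>
      if pvG xs j < v then pvScanA xs (pvG xs j) j (j+1) k else pvScanA xs v m (j+1) k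

-- B's suffix-argmin function: pvArg xs i = leftmost index of the minimum of xs[i:]
def pvArg (xs : List Int) (i : Nat) : Nat :=
  if h : i + 1 < xs.length then
    (if pvG xs i ≤ pvG xs (pvArg xs (i+1)) then i else pvArg xs (i+1))
  else xs.length - 1
termination_by xs.length - i

-- nat-level version of B's table-building loop: process indices c-1, c-2, …, 0
def pvTabAux (xs : List Int) : List Int → Nat → List Int
  | a, 0 => a
  | a, c+1 =>
    pvTabAux xs
      (match PySem.List.pyGet? xs ((c : Nat) : Int), PySem.List.pyGet? a (((c : Nat) : Int)+1) with
       | some x, some t =>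
         (match PySem.List.pyGet? xs t with
          | some y => PySem.List.pySetD a ((c : Nat) : Int) (if x ≤ y then ((c : Nat) : Int) else t)
          | none => a)
       | _, _ => a) c

theorem pvGet_cast (xs : List Int) (t : Nat) (h : t < xs.length) :
    PySem.List.pyGet? xs (t : Int) = some (pvG xs t) := by
  rw [PySem.List.pyGet?_natCast, List.getElem?_eq_getElem h]
  simp [pvG, List.getD_eq_getElem?_getD, List.getElem?_eq_getElem h]

theorem pvDrop_last (xs : List Int) (h : xs ≠ []) :
    xs.drop (xs.length - 1) = [pvG xs (xs.length - 1)] := by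
  induction xs with
  | nil => simp at h
  | cons x t ih =>
    cases t with
    | nil => simp [pvG]
    | cons y u => simpa [pvG] using ih (by simp)

theorem pvFoldA_bridge (xs : List Int) :
    ∀ (k j : Nat) (v : Int) (m : Nat), j + k ≤ xs.length →
    (PySem.List.pyRange (j : Int) ((j : Int) + (k : Int)) 1).foldl
        (fun (p : Int × Int) i =>
          match PySem.List.pyGet? xs i with
          | none => p
          | some x => if x < p.1 then (x, i) else p)
        (v, (m : Int))
      = ((pvScanA xs v m j k).1, ((pvScanA xs v m j k).2 : Int)) := by
  intro k
  induction k with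
  | zero => intro j v m h; simp [pvScanA]
  | succ k ih =>
    intro j v m h
    rw [PySem.List.pyRange_one_cons (by push_cast; omega)]
    have hj : j < xs.length := by omega
    simp only [List.foldl_cons, PySem.List.pyGet?_natCast, List.getElem?_eq_getElem hj]
    have hget : xs[j] = pvG xs j := by simp [pvG, List.getD_eq_getElem?_getD, List.getElem?_eq_getElem hj]
    rw [hget]
    have hcast : (j:Int) + 1 = ((j+1 : Nat) : Int) := by push_cast; ring
    have h2 : (j:Int) + ((k+1:Nat):Int) = ((j+1:Nat):Int) + ((k:Nat):Int) := by push_cast; ring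
    simp only [pvScanA]
    by_cases hc : pvG xs j < v
    · rw [if_pos hc, if_pos hc, hcast, h2, ih (j+1) (pvG xs j) j (by omega)]
    · rw [if_neg hc, if_neg hc, hcast, h2, ih (j+1) v m (by omega)]

theorem pvScanA_inv (xs : List Int) (lo : Nat) :
    ∀ (k j : Nat) (v : Int) (m : Nat), j + k = xs.length → lo ≤ m → m < j → v = pvG xs m →
    (∀ t, m < t → t < j → v ≤ pvG xs t) → (∀ t, lo ≤ t → t < m → v < pvG xs t) →
    (pvScanA xs v m j k).1 = pvG xs (pvScanA xs v m j k).2 ∧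
    lo ≤ (pvScanA xs v m j k).2 ∧ (pvScanA xs v m j k).2 < xs.length ∧
    (∀ t, lo ≤ t → t < (pvScanA xs v m j k).2 → (pvScanA xs v m j k).1 < pvG xs t) ∧
    (∀ t, (pvScanA xs v m j k).2 < t → t < xs.length → (pvScanA xs v m j k).1 ≤ pvG xs t) := by
  intro k
  induction k with
  | zero =>
    intro j v m hlen hlo hmj hv hle hlt
    simp only [pvScanA]
    refine ⟨hv, hlo, by omega, ?_, ?_⟩
    · intro t h1 h2; exact hlt t h1 h2
    · intro t h1 h2; exact hle t h1 (by omega)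
  | succ k ih =>
    intro j v m hlen hlo hmj hv hle hlt
    simp only [pvScanA]
    by_cases hc : pvG xs j < v
    · rw [if_pos hc]
      apply ih (j+1) (pvG xs j) j (by omega) (by omega) (by omega) rfl
      · intro t h1 h2; omega
      · intro t h1 h2
        by_cases htm : t < m
        · exact lt_trans hc (hlt t h1 htm)
        · by_cases hteq : t = m
          · subst hteq; rw [← hv]; exact hc
          · exact lt_of_lt_of_le hc (hle t (by omega) (by omega))
    · rw [if_neg hc]
      apply ih (j+1) v m (by omega) hlo (by omega) hv
      · intro t h1 h2
        by_cases htj : t = j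
        · subst htj; omega
        · exact hle t h1 (by omega)
      · exact hlt

theorem pvSpec_step (xs : List Int) (s m : Nat) (v : Int) (hs : s ≤ m) (hm : m + 1 < xs.length)
    (hv : v = pvG xs m)
    (hlt : ∀ t, s ≤ t → t < m → v < pvG xs t)
    (hle : ∀ t, m < t → t < xs.length → v ≤ pvG xs t) :
    pvSpec xs s = v :: pvSpec xs (m+1) := by
  have hsplit : List.range' s (xs.length - 1 - s) = List.range' s (m-s) ++ List.range' m (xs.length - 1 - m) := by
    have h1 : s + (m - s) = m := by omega
    have h2 : (m - s) + (xs.length - 1 - m) = xs.length - 1 - s := by omega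
    calc List.range' s (xs.length - 1 - s) = List.range' s ((m-s) + (xs.length - 1 - m)) := by rw [h2]
    _ = List.range' s (m-s) ++ List.range' (s + 1*(m-s)) (xs.length - 1 - m) := (List.range'_append (s:=s) (m:=m-s) (n:=xs.length - 1 - m) (step:=1)).symm
    _ = List.range' s (m-s) ++ List.range' m (xs.length - 1 - m) := by rw [show s + 1*(m-s) = m by omega]
  have hsucc : List.range' m (xs.length - 1 - m) = m :: List.range' (m+1) (xs.length - 1 - (m+1)) := by
    have h3 : xs.length - 1 - m = (xs.length - 1 - (m+1)) + 1 := by omega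
    rw [h3, List.range'_succ]
  have hlow0 : ∀ t ∈ List.range' s (m-s), pvCrit xs t = false := by
    intro t ht
    rw [List.mem_range'_1] at ht
    simp only [pvCrit, List.all_eq_false]
    refine ⟨m, ?_, ?_⟩
    · rw [List.mem_range'_1]; omega
    · simp only [decide_eq_true_eq]
      have := hlt t (by omega) (by omega)
      omega
  have hlow : (List.range' s (m-s)).filter (pvCrit xs) = [] := by
    rw [List.filter_eq_nil_iff]
    intro t ht
    rw [hlow0 t ht]
    simp
  have hcm : pvCrit xs m = true := by
    simp only [pvCrit, List.all_eq_true]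
    intro j hj
    rw [List.mem_range'_1] at hj
    simp only [decide_eq_true_eq]
    rw [← hv]
    exact hle j (by omega) (by omega)
  unfold pvSpec
  rw [hsplit, hsucc, List.filter_append]
  rw [hlow]
  simp [hcm, hv]

theorem pvA_eq_spec (xs : List Int)
    (hcond : xs.getD (xs.length - 2) 0 ≤ xs.getD (xs.length - 1) 0) :
    ∀ (fuel : Nat) (s : Nat), s < xs.length → xs.length - s ≤ fuel →
    findNextItemFuelA fuel xs (s : Int) = pvSpec xs s := by
  intro fuel
  induction fuel with
  | zero => intro s hs hf; omega
  | succ fuel ih =>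
    intro s hs hf
    simp only [findNextItemFuelA]
    by_cases hbase : (s : Int) = (xs.length : Int) - 1
    · rw [if_pos hbase]
      have hsl : s = xs.length - 1 := by omega
      have hne : xs ≠ [] := by intro h; subst h; simp at hs
      rw [PySem.List.slice_from_neg_one, pvDrop_last xs hne]
      have : xs.length - 1 - s = 0 := by omega
      simp [pvSpec, this]
    · rw [if_neg hbase]
      have hs2 : s + 1 < xs.length := by omega
      have hn2 : 2 ≤ xs.length := by omega
      have hget : PySem.List.pyGet? xs (s : Int) = some (pvG xs s) := by
        rw [PySem.List.pyGet?_natCast, List.getElem?_eq_getElem hs]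
        simp [pvG, List.getD_eq_getElem?_getD, List.getElem?_eq_getElem hs]
      rw [hget]
      simp only
      rw [show ((xs.length : Nat) : Int) = (s : Int) + ((xs.length - s : Nat) : Int) by omega]
      rw [pvFoldA_bridge xs (xs.length - s) s (pvG xs s) s (by omega)]
      rw [show xs.length - s = (xs.length - s - 1) + 1 by omega]
      simp only [pvScanA, lt_irrefl, ite_self]
      have hinv := pvScanA_inv xs s (xs.length - s - 1) (s+1) (pvG xs s) s
        (by omega) (le_refl s) (by omega) rfl
        (by intro t h1 h2; omega) (by intro t h1 h2; omega)
      set r := pvScanA xs (pvG xs s) s (s+1) (xs.length - s - 1) with hr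
      obtain ⟨hrv, hrlo, hrlt, hltprop, hleprop⟩ := hinv
      have hrne : r.2 + 1 < xs.length := by
        by_contra hcon
        have hm : r.2 = xs.length - 1 := by omega
        have := hltprop (xs.length - 2) (by omega) (by omega)
        have hveq : r.1 = pvG xs (xs.length - 1) := by rw [hrv, hm]
        simp only [pvG] at *
        omega
      have hcast : r.2 + (1:Int) = ((r.2 + 1 : Nat) : Int) := by push_cast; ring
      rw [hcast, ih (r.2 + 1) hrne (by omega)]
      exact (pvSpec_step xs s r.2 r.1 hrlo hrne hrv hltprop hleprop).symm

theorem pvArg_props (xs : List Int) :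
    ∀ (d i : Nat), i < xs.length → xs.length - 1 - i = d →
    i ≤ pvArg xs i ∧ pvArg xs i < xs.length ∧
    (∀ t, i ≤ t → t < pvArg xs i → pvG xs (pvArg xs i) < pvG xs t) ∧
    (∀ t, pvArg xs i ≤ t → t < xs.length → pvG xs (pvArg xs i) ≤ pvG xs t) := by
  intro d
  induction d with
  | zero =>
    intro i hi hd
    have hie : ¬ (i + 1 < xs.length) := by omega
    rw [pvArg, dif_neg hie]
    refine ⟨by omega, by omega, ?_, ?_⟩
    · intro t h1 h2; omega
    · intro t h1 h2
      have : t = xs.length - 1 := by omega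
      subst this; exact le_refl _
  | succ d ih =>
    intro i hi hd
    have hlt : i + 1 < xs.length := by omega
    obtain ⟨p1, p2, p3, p4⟩ := ih (i+1) (by omega) (by omega)
    rw [pvArg, dif_pos hlt]
    by_cases hc : pvG xs i ≤ pvG xs (pvArg xs (i+1))
    · rw [if_pos hc]
      refine ⟨le_refl _, by omega, ?_, ?_⟩
      · intro t h1 h2; omega
      · intro t h1 h2
        by_cases hti : t = i
        · subst hti; exact le_refl _
        · by_cases htp : pvArg xs (i+1) ≤ t
          · exact le_trans hc (p4 t htp h2)
          · exact le_of_lt (lt_of_le_of_lt hc (p3 t (by omega) (by omega)))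
    · rw [if_neg hc]
      refine ⟨by omega, p2, ?_, ?_⟩
      · intro t h1 h2
        by_cases hti : t = i
        · subst hti; omega
        · exact p3 t (by omega) h2
      · exact p4

theorem pvTabBridge (xs : List Int) :
    ∀ (c : Nat) (a : List Int),
    (PySem.List.pyRange (((c : Nat) : Int) - 1) (-1) (-1)).foldl
        (fun (a : List Int) j =>
          match PySem.List.pyGet? xs j, PySem.List.pyGet? a (j+1) with
          | some x, some t =>
            (match PySem.List.pyGet? xs t with
             | some y => PySem.List.pySetD a j (if x ≤ y then j else t)
             | none => a)
          | _, _ => a)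
        a
      = pvTabAux xs a c := by
  intro c
  induction c with
  | zero =>
    intro a
    rw [PySem.List.pyRange_neg_one_eq_nil (by omega : ((0:Nat):Int) - 1 ≤ -1)]
    simp [pvTabAux]
  | succ c ih =>
    intro a
    rw [show (((c+1 : Nat)) : Int) - 1 = ((c : Nat) : Int) by omega]
    rw [PySem.List.pyRange_neg_one_cons (by omega : (-1 : Int) < ((c : Nat) : Int))]
    rw [List.foldl_cons]
    simp only [pvTabAux]
    exact ih _

theorem pvTab_inv (xs : List Int) :
    ∀ (c : Nat) (a : List Int), c ≤ xs.length - 1 → a.length = xs.length →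
    (∀ i : Nat, c ≤ i → i < xs.length → PySem.List.pyGet? a (i : Int) = some ((pvArg xs i : Nat) : Int)) →
    (∀ i : Nat, i < xs.length → PySem.List.pyGet? (pvTabAux xs a c) (i : Int) = some ((pvArg xs i : Nat) : Int)) := by
  intro c
  induction c with
  | zero =>
    intro a _ _ h i hi
    exact h i (by omega) hi
  | succ c ih =>
    intro a hc hlen h
    have hcx : c + 1 < xs.length := by omega
    have hcn : c < xs.length := by omega
    obtain ⟨q1, q2, q3, q4⟩ := pvArg_props xs (xs.length - 1 - (c+1)) (c+1) hcx rfl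
    have hgc : PySem.List.pyGet? xs ((c : Nat) : Int) = some (pvG xs c) := pvGet_cast xs c hcn
    have hga : PySem.List.pyGet? a (((c : Nat) : Int) + 1) = some ((pvArg xs (c+1) : Nat) : Int) := by
      rw [show ((c : Nat) : Int) + 1 = (((c+1 : Nat)) : Int) by omega]
      exact h (c+1) (by omega) hcx
    have hgt : PySem.List.pyGet? xs ((pvArg xs (c+1) : Nat) : Int) = some (pvG xs (pvArg xs (c+1))) :=
      pvGet_cast xs _ q2
    simp only [pvTabAux, hgc, hga, hgt]
    have harg : pvArg xs c = if pvG xs c ≤ pvG xs (pvArg xs (c+1)) then c else pvArg xs (c+1) := by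
      rw [pvArg, dif_pos hcx]
    apply ih
    · omega
    · rw [PySem.List.pySetD_natCast, List.length_set, hlen]
    · intro i h1 h2
      rw [PySem.List.pySetD_natCast, PySem.List.pyGet?_natCast, List.getElem?_set]
      by_cases hic : c = i
      · subst hic
        rw [if_pos rfl, if_pos (by omega : c < a.length)]
        rw [harg]
        split_ifs <;> simp
      · rw [if_neg hic]
        rw [← PySem.List.pyGet?_natCast]
        exact h i (by omega) h2

theorem pvLoopB (xs arg : List Int) (hn : 1 ≤ xs.length)
    (hcond : xs.getD (xs.length - 2) 0 ≤ xs.getD (xs.length - 1) 0)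
    (harg : ∀ t : Nat, t < xs.length → PySem.List.pyGet? arg (t : Int) = some ((pvArg xs t : Nat) : Int)) :
    ∀ (fuel : Nat) (i : Nat) (out : List Int), i < xs.length → xs.length - i ≤ fuel →
    findNextItemLoopB fuel xs arg (i : Int) out = out ++ pvSpec xs i := by
  intro fuel
  induction fuel with
  | zero => intro i out hi hf; omega
  | succ fuel ih =>
    intro i out hi hf
    obtain ⟨q1, q2, q3, q4⟩ := pvArg_props xs (xs.length - 1 - i) i hi rfl
    simp only [findNextItemLoopB, harg i hi, pvGet_cast xs (pvArg xs i) q2]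
    by_cases hend : i = xs.length - 1
    · have hargi : pvArg xs i = xs.length - 1 := by omega
      rw [if_pos (by omega : ((pvArg xs i : Nat) : Int) = (xs.length : Int) - 1)]
      rw [hargi]
      have : xs.length - 1 - i = 0 := by omega
      simp [pvSpec, hend]
    · have hne : pvArg xs i ≠ xs.length - 1 := by
        intro hcontra
        have h38 := q3 (xs.length - 2) (by omega) (by omega)
        rw [hcontra] at h38
        simp only [pvG] at h38
        omega
      rw [if_neg (by omega : ¬ (((pvArg xs i : Nat) : Int) = (xs.length : Int) - 1))]
      rw [show ((pvArg xs i : Nat) : Int) + 1 = (((pvArg xs i + 1 : Nat)) : Int) by omega]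
      rw [ih (pvArg xs i + 1) (out ++ [pvG xs (pvArg xs i)]) (by omega) (by omega)]
      rw [pvSpec_step xs i (pvArg xs i) (pvG xs (pvArg xs i)) q1 (by omega) rfl q3 (fun t h1 h2 => q4 t (le_of_lt h1) h2)]
      simp

theorem pvB_eq_spec (xs : List Int) (s : Nat) (hs : s + 1 < xs.length)
    (hcond : xs.getD (xs.length - 2) 0 ≤ xs.getD (xs.length - 1) 0) :
    findNextItem_alt xs (s : Int) = pvSpec xs s := by
  have hn2 : 2 ≤ xs.length := by omega
  unfold findNextItem_alt
  rw [if_neg (by omega : ¬ ((s:Int) = (xs.length : Int) - 1))]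
  have htabeq : findNextItemTab xs = pvTabAux xs (List.replicate xs.length ((xs.length : Int) - 1)) (xs.length - 1) := by
    unfold findNextItemTab
    rw [show ((xs.length : Int) - 2) = (((xs.length - 1 : Nat)) : Int) - 1 by omega]
    exact pvTabBridge xs (xs.length - 1) _
  have hinit : ∀ i : Nat, xs.length - 1 ≤ i → i < xs.length →
      PySem.List.pyGet? (List.replicate xs.length ((xs.length : Int) - 1)) (i : Int)
        = some ((pvArg xs i : Nat) : Int) := by
    intro i h1 h2
    have hie : i = xs.length - 1 := by omega
    have harg1 : pvArg xs i = xs.length - 1 := by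
      rw [pvArg]
      rw [dif_neg (by omega : ¬ (i + 1 < xs.length))]
    rw [PySem.List.pyGet?_natCast, harg1, List.getElem?_replicate]
    simp only [if_pos h2]
    congr 1
    omega
  have htab := pvTab_inv xs (xs.length - 1) _ (le_refl _) (by simp) hinit
  rw [htabeq]
  rw [pvLoopB xs _ (by omega) hcond htab (xs.length + 1) s [] (by omega) (by omega)]
  simp

-- ===== VERDICT (by name: the statement is the Claim_ definition above) =====
theorem findNextItem_spec : Claim_equal_findNextItem := by
  unfold Claim_equal_findNextItem
  intro xs start _ hpre
  obtain ⟨h0, h1, h23⟩ := hpre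
  unfold Spec_findNextItem
  have hstart : start = ((start.toNat : Nat) : Int) := (Int.toNat_of_nonneg h0).symm
  set s := start.toNat with hsdef
  by_cases hb : start = (xs.length : Int) - 1
  · unfold findNextItem findNextItem_alt
    simp only [findNextItemFuelA, if_pos hb]
  · have hcond : xs.getD (xs.length - 2) 0 ≤ xs.getD (xs.length - 1) 0 := by tauto
    have hs1 : s + 1 < xs.length := by omega
    rw [hstart]
    unfold findNextItem
    rw [pvA_eq_spec xs hcond (2 * xs.length + 2) s (by omega) (by omega)]
    rw [pvB_eq_spec xs s hs1 hcond]
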